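-- pv_equiv track=rewrite | github.com/christian-oudard/quiz_interview | floyd_triangle.py | floyd_triangle_rows
-- ===== SOURCE A (Python) =====
-- def floyd_triangle_rows(num_rows):
--     i = 0
--     output_rows = []
--     for row_len in range(1, num_rows + 1):
--         current_row = []
--         for _ in range(row_len):
--             i += 1
--             current_row.append(i)
--         output_rows.append(current_row)
--     return output_rows
-- ===== SOURCE B (Python) =====
-- def floyd_triangle_rows(num_rows):
--     return [
--         list(range(r * (r - 1) // 2 + 1, r * (r - 1) // 2 + 1 + r))
--         for r in range(1, num_rows + 1)
--     ]
-- ===== Notes on version B (the rewrite author's own statement) =====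
-- stated objective: alternative
-- what changed: Replaces the sequentially threaded counter i and the inner append loop with an independent per-row computation: each row r is range(start, start+r) with start = r*(r-1)//2 + 1 from the triangular-number closed form.
import Mathlib
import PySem

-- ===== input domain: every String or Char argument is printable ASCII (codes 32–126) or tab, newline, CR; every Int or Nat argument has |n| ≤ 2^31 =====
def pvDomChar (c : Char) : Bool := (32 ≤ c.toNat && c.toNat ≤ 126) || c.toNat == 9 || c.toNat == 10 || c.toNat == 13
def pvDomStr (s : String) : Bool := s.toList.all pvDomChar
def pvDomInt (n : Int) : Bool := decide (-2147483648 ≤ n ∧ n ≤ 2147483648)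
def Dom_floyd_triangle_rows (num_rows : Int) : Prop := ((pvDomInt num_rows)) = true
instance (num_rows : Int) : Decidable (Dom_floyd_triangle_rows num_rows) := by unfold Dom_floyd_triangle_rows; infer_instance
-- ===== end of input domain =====

-- B drops A's threaded counter: each row r is computed independently as range(start, start+r) with start = r*(r-1)//2 + 1 (alternative decomposition, not faster).


-- ===== PORT A =====
def floyd_triangle_rows (num_rows : Int) : List (List Int) :=
  let st := (PySem.List.pyRange 1 (num_rows + 1) 1).foldl
    (fun (st : Int × List (List Int)) row_len =>
      let inner := (PySem.List.pyRange 0 row_len 1).foldl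
        (fun (st2 : Int × List Int) _ => (st2.1 + 1, st2.2 ++ [st2.1 + 1]))
        (st.1, [])
      (inner.1, st.2 ++ [inner.2]))
    ((0 : Int), ([] : List (List Int)))
  st.2

-- ===== PORT B =====
def floyd_triangle_rows_alt (num_rows : Int) : List (List Int) :=
  (PySem.List.pyRange 1 (num_rows + 1) 1).map (fun r =>
    PySem.List.pyRange (PySem.Int.floordiv (r * (r - 1)) 2 + 1)
      (PySem.Int.floordiv (r * (r - 1)) 2 + 1 + r) 1)

-- ===== PRECONDITION & SPEC =====
def Spec_floyd_triangle_rows (num_rows : Int) (out : List (List Int)) : Prop := out = floyd_triangle_rows_alt num_rows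
instance (num_rows : Int) (out : List (List Int)) : Decidable (Spec_floyd_triangle_rows num_rows out) := by unfold Spec_floyd_triangle_rows; infer_instance

-- ===== CLAIM (what is proved, stated in full; the proofs are below) =====
def Claim_equal_floyd_triangle_rows : Prop := ∀ (num_rows : Int), Dom_floyd_triangle_rows num_rows → Spec_floyd_triangle_rows num_rows (floyd_triangle_rows num_rows)

-- ===== LEMMAS AND PROOFS =====

-- ===== VERDICT (by name: the statement is the Claim_ definition above) =====
-- triangular number as Int
def pvTri (k : Nat) : Int := ((k * (k + 1) / 2 : Nat) : Int)

theorem pvTri_succ (k : Nat) : pvTri (k + 1) = pvTri k + (k + 1) := by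
  unfold pvTri
  have h : (k + 1) * (k + 1 + 1) = k * (k + 1) + 2 * (k + 1) := by ring
  have : (k + 1) * (k + 1 + 1) / 2 = k * (k + 1) / 2 + (k + 1) := by omega
  rw [this]; push_cast; ring

theorem pvInner (n : Nat) (i0 : Int) (acc : List Int) :
    (List.range n).foldl (fun (st2 : Int × List Int) _ => (st2.1 + 1, st2.2 ++ [st2.1 + 1])) (i0, acc)
    = (i0 + n, acc ++ (List.range n).map (fun k : Nat => i0 + 1 + (k : Int))) := by
  induction n generalizing acc with
  | zero => simp
  | succ m ih =>
    rw [List.range_succ, List.foldl_append, ih]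
    simp only [List.foldl_cons, List.foldl_nil, Prod.mk.injEq]
    refine ⟨by push_cast; ring, ?_⟩
    simp only [List.map_append, List.map_cons, List.map_nil, List.append_assoc]
    have h : i0 + (m : Int) + 1 = i0 + 1 + (m : Int) := by ring
    rw [h]

theorem pvOuter (m : Nat) (acc : List (List Int)) :
    (List.range m).foldl
      (fun (st : Int × List (List Int)) k =>
        let inner := (List.range (k + 1)).foldl
          (fun (st2 : Int × List Int) _ => (st2.1 + 1, st2.2 ++ [st2.1 + 1])) (st.1, [])
        (inner.1, st.2 ++ [inner.2]))
      (0, acc)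
    = (pvTri m, acc ++ (List.range m).map (fun k =>
        (List.range (k + 1)).map (fun j : Nat => pvTri k + 1 + (j : Int)))) := by
  induction m generalizing acc with
  | zero => simp [pvTri]
  | succ m ih =>
    rw [List.range_succ, List.foldl_append, ih]
    simp only [List.foldl_cons, List.foldl_nil]
    rw [pvInner]
    simp only [Prod.mk.injEq, pvTri_succ]
    constructor
    · push_cast; ring
    · simp [List.range_succ, List.append_assoc]

theorem pvB_eq (num_rows : Int) :
    floyd_triangle_rows_alt num_rows
    = (List.range (num_rows + 1 - 1).toNat).map (fun k =>
        (List.range (k + 1)).map (fun j : Nat => pvTri k + 1 + (j : Int))) := by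
  unfold floyd_triangle_rows_alt
  rw [PySem.List.pyRange_one 1 (num_rows + 1)]
  rw [List.map_map]
  congr 1
  funext k
  simp only [Function.comp]
  have h1 : (1 : Int) + (k : Int) - 1 = (k : Int) := by ring
  have h2 : ((1 : Int) + (k : Int)) * ((1 : Int) + (k : Int) - 1) = ((k * (k + 1) : Nat) : Int) := by
    push_cast; ring
  rw [h2]
  have h3 : PySem.Int.floordiv ((k * (k + 1) : Nat) : Int) 2 = pvTri k := by
    unfold pvTri
    exact_mod_cast PySem.Int.floordiv_natCast (k * (k + 1)) 2
  rw [h3, PySem.List.pyRange_one]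
  have h4 : (pvTri k + 1 + (1 + (k : Int)) - (pvTri k + 1)).toNat = k + 1 := by omega
  rw [h4]

theorem floyd_triangle_rows_spec : Claim_equal_floyd_triangle_rows := by
  intro num_rows _
  unfold Spec_floyd_triangle_rows
  rw [pvB_eq]
  unfold floyd_triangle_rows
  rw [PySem.List.pyRange_one 1 (num_rows + 1)]
  rw [List.foldl_map]
  have hin : ∀ (k : Nat) (st : Int × List (List Int)),
      (PySem.List.pyRange 0 (1 + (k : Int)) 1).foldl
        (fun (st2 : Int × List Int) _ => (st2.1 + 1, st2.2 ++ [st2.1 + 1])) (st.1, [])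
      = (List.range (k + 1)).foldl
        (fun (st2 : Int × List Int) _ => (st2.1 + 1, st2.2 ++ [st2.1 + 1])) (st.1, []) := by
    intro k st
    rw [PySem.List.pyRange_one 0 (1 + (k : Int)), List.foldl_map]
    have : ((1 : Int) + (k : Int) - 0).toNat = k + 1 := by omega
    rw [this]
  simp only [hin]
  rw [pvOuter]
  simp
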